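-- pv_equiv track=rewrite | github.com/M-Quadra/LeetCode-problems | Algorithms/LCP/17/nGK0Fy.py | calculate
-- ===== SOURCE A (Python) =====
-- def calculate(s: str) -> int:
--     x, y = 1, 0
--     for _, v in enumerate(s):
--         if v == 'A':
--             x = 2*x + y
--         else:
--             y = 2*y + x
--     return x + y
-- ===== SOURCE B (Python) =====
-- def calculate(s: str) -> int:
--     # x+y doubles per character regardless of branch; starts at 1.
--     return 2 ** len(s)
-- ===== Notes on version B (the rewrite author's own statement) =====
-- stated objective: simpler
-- what changed: Replaced the per-character state machine by the closed form 2**len(s), since both branches double x+y.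
import Mathlib
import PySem

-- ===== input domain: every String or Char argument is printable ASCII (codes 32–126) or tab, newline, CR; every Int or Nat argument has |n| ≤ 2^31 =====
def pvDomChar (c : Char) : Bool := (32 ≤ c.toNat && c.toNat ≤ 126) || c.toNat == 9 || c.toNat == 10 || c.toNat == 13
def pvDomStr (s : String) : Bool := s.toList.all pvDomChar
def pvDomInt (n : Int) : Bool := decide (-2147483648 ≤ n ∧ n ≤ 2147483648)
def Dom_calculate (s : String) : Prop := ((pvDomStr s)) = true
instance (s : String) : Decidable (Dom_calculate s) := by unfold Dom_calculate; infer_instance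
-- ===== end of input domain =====

-- B replaces A's per-character (x,y) state machine by the closed form 2^len(s): simpler.

-- ===== PORT A =====
def calculate (s : String) : Int :=
  let st := (PySem.List.enumerate s.toList).foldl
    (fun (p : Int × Int) iv =>
      if iv.2 = 'A' then (2 * p.1 + p.2, p.2) else (p.1, 2 * p.2 + p.1))
    (1, 0)
  st.1 + st.2

-- ===== PORT B =====
def calculate_alt (s : String) : Int :=
  2 ^ (PySem.Str.len s).toNat

-- ===== PRECONDITION & SPEC =====
def Spec_calculate (s : String) (out : Int) : Prop := out = calculate_alt s
instance (s : String) (out : Int) : Decidable (Spec_calculate s out) := by unfold Spec_calculate; infer_instance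

-- ===== CLAIM (what is proved, stated in full; the proofs are below) =====
def Claim_equal_calculate : Prop := ∀ (s : String), Dom_calculate s → Spec_calculate s (calculate s)

-- ===== LEMMAS AND PROOFS =====

theorem calc_foldl_sum (l : List (Int × Char)) (p : Int × Int) :
    (l.foldl (fun (p : Int × Int) iv =>
      if iv.2 = 'A' then (2 * p.1 + p.2, p.2) else (p.1, 2 * p.2 + p.1)) p).1 +
    (l.foldl (fun (p : Int × Int) iv =>
      if iv.2 = 'A' then (2 * p.1 + p.2, p.2) else (p.1, 2 * p.2 + p.1)) p).2
    = 2 ^ l.length * (p.1 + p.2) := by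
  induction l generalizing p with
  | nil => simp
  | cons h t ih =>
    simp only [List.foldl_cons, List.length_cons]
    rw [ih]
    split <;> simp <;> ring

-- ===== VERDICT (by name: the statement is the Claim_ definition above) =====
theorem calculate_spec : Claim_equal_calculate := by
  intro s _
  show calculate s = calculate_alt s
  unfold calculate calculate_alt
  simp only [calc_foldl_sum]
  simp [PySem.List.length_enumerate]
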